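-- pv_equiv track=rewrite | github.com/MozhiJiawei/Huawei_OJ | OJ_Python/OJ_Python_2.7/str_match.py | is_all_char_exist
-- ===== SOURCE A (Python) =====
-- def is_all_char_exist(short_str, long_str):
--     short_str_set = set(short_str)
--     for c in long_str:
--         short_str_set.discard(c)
--     if short_str_set:
--         return "false"
--     else:
--         return "true"
-- ===== SOURCE B (Python) =====
-- def is_all_char_exist(short_str, long_str):
--     need = sorted(set(short_str))
--     have = sorted(set(long_str))
--     i = 0
--     for c in need:
--         while i < len(have) and have[i] < c:
--             i += 1
--         if i == len(have) or have[i] != c: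
--             return "false"
--         i += 1
--     return "true"
-- ===== Notes on version B (the rewrite author's own statement) =====
-- stated objective: alternative
-- what changed: B sorts the distinct characters of both strings and runs a two-pointer merge scan over the two sorted lists, instead of A's hash-set mutation (discarding long_str's chars from a set of short_str's chars).
import Mathlib
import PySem

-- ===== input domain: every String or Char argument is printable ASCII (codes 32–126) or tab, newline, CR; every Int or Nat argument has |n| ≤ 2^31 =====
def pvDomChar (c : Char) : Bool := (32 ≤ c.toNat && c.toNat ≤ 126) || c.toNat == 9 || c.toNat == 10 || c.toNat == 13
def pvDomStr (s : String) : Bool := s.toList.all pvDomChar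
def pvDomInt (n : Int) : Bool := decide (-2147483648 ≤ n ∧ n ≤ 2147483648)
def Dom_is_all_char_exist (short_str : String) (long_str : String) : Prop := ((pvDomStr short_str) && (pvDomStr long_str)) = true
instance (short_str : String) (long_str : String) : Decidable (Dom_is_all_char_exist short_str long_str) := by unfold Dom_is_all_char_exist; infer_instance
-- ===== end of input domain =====

-- B sorts the distinct characters of both strings and runs a two-pointer merge scan,
-- instead of A's set mutation (discarding long_str's chars from a set of short_str's); objective: alternative.


-- ===== PORT A =====
def is_all_char_exist (short_str : String) (long_str : String) : String :=
  let short_str_set : PySem.Set Char := PySem.Set.ofList short_str.toList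
  let final := long_str.toList.foldl (fun s c => PySem.Set.discard s c) short_str_set
  if final ≠ [] then "false" else "true"

-- ===== PORT B =====
-- the 'for c in need' loop with its inner 'while have[i] < c: i += 1' and early
-- returns, as structural recursion on (need, the suffix of have from i)
def pvMergeScan : List Char → List Char → Bool
  | [], _ => true
  | _ :: _, [] => false
  | c :: rest, h :: t =>
      if h < c then pvMergeScan (c :: rest) t
      else if h = c then pvMergeScan rest t
      else false

def is_all_char_exist_alt (short_str : String) (long_str : String) : String :=
  let need := PySem.List.sorted (PySem.Set.ofList short_str.toList) (fun x => x) false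
  let have_ := PySem.List.sorted (PySem.Set.ofList long_str.toList) (fun x => x) false
  if pvMergeScan need have_ then "true" else "false"

-- ===== PRECONDITION & SPEC =====
def Spec_is_all_char_exist (short_str : String) (long_str : String) (out : String) : Prop := out = is_all_char_exist_alt short_str long_str
instance (short_str : String) (long_str : String) (out : String) : Decidable (Spec_is_all_char_exist short_str long_str out) := by unfold Spec_is_all_char_exist; infer_instance

-- ===== CLAIM (what is proved, stated in full; the proofs are below) =====
def Claim_equal_is_all_char_exist : Prop := ∀ (short_str : String) (long_str : String), Dom_is_all_char_exist short_str long_str → Spec_is_all_char_exist short_str long_str (is_all_char_exist short_str long_str)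

-- ===== LEMMAS AND PROOFS =====

theorem mem_foldl_discard (l : List Char) (s : PySem.Set Char) (x : Char) :
    x ∈ l.foldl (fun s c => PySem.Set.discard s c) s ↔ x ∈ s ∧ x ∉ l := by
  induction l generalizing s with
  | nil => simp
  | cons c t ih =>
    rw [List.foldl_cons, ih]
    simp only [PySem.Set.discard, List.mem_filter, List.mem_cons]
    constructor
    · rintro ⟨⟨hs, hne⟩, ht⟩
      refine ⟨hs, ?_⟩
      rintro (rfl | h)
      · simp at hne
      · exact ht h
    · rintro ⟨hs, hnot⟩
      exact ⟨⟨hs, by simp; intro h; exact hnot (Or.inl h)⟩, fun h => hnot (Or.inr h)⟩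

-- on strictly sorted lists the merge scan decides list containment
theorem pvMergeScan_iff (need hv : List Char)
    (hn : need.Pairwise (· < ·)) (hh : hv.Pairwise (· < ·)) :
    pvMergeScan need hv = true ↔ ∀ c ∈ need, c ∈ hv := by
  induction hv generalizing need with
  | nil =>
    cases need with
    | nil => simp [pvMergeScan]
    | cons c rest =>
      simp only [pvMergeScan, Bool.false_eq_true, false_iff]
      intro hall
      exact absurd (hall c List.mem_cons_self) List.not_mem_nil
  | cons h t ih =>
    cases need with
    | nil => simp [pvMergeScan]
    | cons c rest =>
      have hh' := (List.pairwise_cons.mp hh).2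
      have hhead := (List.pairwise_cons.mp hh).1
      simp only [pvMergeScan]
      by_cases hlt : h < c
      · rw [if_pos hlt, ih _ hn hh']
        constructor
        · intro hall x hx
          exact List.mem_cons_of_mem _ (hall x hx)
        · intro hall x hx
          rcases List.mem_cons.mp (hall x hx) with hxh | hxt
          · exfalso
            rcases List.mem_cons.mp hx with rfl | hxr
            · exact lt_irrefl _ (hxh ▸ hlt)
            · have := (List.pairwise_cons.mp hn).1 _ hxr
              exact lt_irrefl _ (lt_trans (hxh ▸ hlt) this)
          · exact hxt
      · rw [if_neg hlt]
        by_cases heq : h = c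
        · subst heq
          rw [if_pos rfl, ih _ (List.pairwise_cons.mp hn).2 hh']
          constructor
          · intro hall x hx
            rcases List.mem_cons.mp hx with rfl | hxr
            · exact List.mem_cons_self
            · exact List.mem_cons_of_mem _ (hall x hxr)
          · intro hall x hx
            rcases List.mem_cons.mp (hall x (List.mem_cons_of_mem _ hx)) with hxh | hxt
            · exact absurd ((List.pairwise_cons.mp hn).1 _ hx) (hxh ▸ lt_irrefl _)
            · exact hxt
        · rw [if_neg heq]
          simp only [Bool.false_eq_true, false_iff]
          intro hall
          rcases List.mem_cons.mp (hall c List.mem_cons_self) with rfl | hct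
          · exact heq rfl
          · have hc_lt : c < h := lt_of_le_of_ne (not_lt.mp hlt) (fun e => heq e.symm)
            exact absurd (hhead c hct) (fun h2 => lt_irrefl _ (lt_trans hc_lt h2))

theorem is_all_char_exist_spec : Claim_equal_is_all_char_exist := by
  intro short_str long_str _
  unfold Spec_is_all_char_exist is_all_char_exist is_all_char_exist_alt
  simp only []
  have hsub_iff :
      pvMergeScan (PySem.List.sorted (PySem.Set.ofList short_str.toList) (fun x => x) false)
        (PySem.List.sorted (PySem.Set.ofList long_str.toList) (fun x => x) false) = true
      ↔ ∀ c ∈ short_str.toList, c ∈ long_str.toList := by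
    rw [pvMergeScan_iff _ _ (PySem.List.sorted_ofList_pairwise_lt _)
        (PySem.List.sorted_ofList_pairwise_lt _)]
    constructor
    · intro hall c hc
      have := hall c (by rw [PySem.List.mem_sorted, PySem.Set.mem_ofList]; exact hc)
      rw [PySem.List.mem_sorted, PySem.Set.mem_ofList] at this
      exact this
    · intro hall c hc
      rw [PySem.List.mem_sorted, PySem.Set.mem_ofList] at hc
      rw [PySem.List.mem_sorted, PySem.Set.mem_ofList]
      exact hall c hc
  set final := long_str.toList.foldl (fun s c => PySem.Set.discard s c)
      (PySem.Set.ofList short_str.toList) with hfinal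
  by_cases h : final = []
  · simp only [h, ne_eq, not_true_eq_false, if_false]
    have : ∀ c ∈ short_str.toList, c ∈ long_str.toList := by
      intro c hc
      by_contra hn
      have : c ∈ final := by
        rw [hfinal, mem_foldl_discard]
        exact ⟨by rw [PySem.Set.mem_ofList]; exact hc, hn⟩
      rw [h] at this; exact absurd this List.not_mem_nil
    rw [if_pos (hsub_iff.mpr this)]
  · simp only [h, ne_eq, not_false_eq_true, if_true]
    obtain ⟨c, hc⟩ := List.exists_mem_of_ne_nil final h
    rw [hfinal, mem_foldl_discard, PySem.Set.mem_ofList] at hc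
    rw [if_neg ?_]
    intro hall
    exact hc.2 (hsub_iff.mp hall c hc.1)
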